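-- pv_equiv track=rewrite | github.com/FernandoNobel/sten_bot | character_sheet.py | write_text
-- ===== SOURCE A (Python) =====
-- def write_text(text, x, y, sheet):
--     i = 0
--     j = 0
--
--     for char in text:
--         if char == '\n':
--             j += 1
--             i = 0
--         else:
--             sheet[x+i][y+j] = char
--             i += 1
--
--     return sheet
-- ===== SOURCE B (Python) =====
-- def write_text(text, x, y, sheet):
--     # Same in-place mutation of sheet as the original; returns sheet.
--     for j, line in enumerate(text.split('\n')):
--         for i, char in enumerate(line):
--             sheet[x + i][y + j] = char
--     return sheet
-- ===== Notes on version B (the rewrite author's own statement) =====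
-- stated objective: idiomatic
-- what changed: Replaces the single stateful character scan with an explicit newline branch and manual i/j counters by splitting the text into lines first and writing via two nested enumerate loops (line index j, column index i).
import Mathlib
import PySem

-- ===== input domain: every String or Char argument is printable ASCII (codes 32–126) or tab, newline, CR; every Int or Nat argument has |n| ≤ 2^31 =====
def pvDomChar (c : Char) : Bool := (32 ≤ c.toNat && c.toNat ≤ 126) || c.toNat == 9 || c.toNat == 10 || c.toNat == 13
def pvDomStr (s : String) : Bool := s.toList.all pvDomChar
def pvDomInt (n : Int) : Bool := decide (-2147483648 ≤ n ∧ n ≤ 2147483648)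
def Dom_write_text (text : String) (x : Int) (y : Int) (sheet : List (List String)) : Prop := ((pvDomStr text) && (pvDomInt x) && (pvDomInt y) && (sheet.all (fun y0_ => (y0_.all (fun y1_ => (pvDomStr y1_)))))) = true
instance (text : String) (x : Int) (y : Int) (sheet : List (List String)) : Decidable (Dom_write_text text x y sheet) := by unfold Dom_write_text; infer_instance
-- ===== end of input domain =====

-- B rewrites the stateful newline-branch scan as split('\n') + two nested enumerate loops (idiomatic, same cost);
-- both Pythons mutate `sheet` in place identically and return it — the theorems are about the returned value.


-- sheet[ix][iy] = v  (Python list assignment; negative indices wrap; out of range = IndexError, excluded by Pre_)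
def pvSetCell (s : List (List String)) (ix iy : Int) (v : String) : List (List String) :=
  PySem.List.pySetD s ix (PySem.List.pySetD (PySem.List.pyGetD s ix []) iy v)

-- ===== PORT A =====
-- loop body of A: state (i, j, sheet)
def pvStepA (x y : Int) (st : Int × Int × List (List String)) (c : Char) : Int × Int × List (List String) :=
  if c = '\n' then (0, st.2.1 + 1, st.2.2)
  else (st.1 + 1, st.2.1, pvSetCell st.2.2 (x + st.1) (y + st.2.1) (String.ofList [c]))

def write_text (text : String) (x : Int) (y : Int) (sheet : List (List String)) : List (List String) :=
  (text.toList.foldl (pvStepA x y) ((0 : Int), (0 : Int), sheet)).2.2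

-- ===== PORT B =====
-- text.split('\n') ported as List.splitOn '\n' on the characters; enumerate = zipIdx
def write_text_alt (text : String) (x : Int) (y : Int) (sheet : List (List String)) : List (List String) :=
  (List.splitOn '\n' text.toList).zipIdx.foldl
    (fun s lj =>
      lj.1.zipIdx.foldl (fun s ci => pvSetCell s (x + (ci.2 : Int)) (y + (lj.2 : Int)) (String.ofList [ci.1])) s)
    sheet

-- ===== PRECONDITION & SPEC =====
-- Pre_ excludes exactly the inputs on which A raises IndexError: some written cell (x+i, y+j) is out of
-- Python range for the sheet (negative in-range indices wrap and are INSIDE Pre_, as in Python).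
def Pre_write_text (text : String) (x : Int) (y : Int) (sheet : List (List String)) : Prop :=
  ∀ lj ∈ (List.splitOn '\n' text.toList).zipIdx, ∀ ci ∈ lj.1.zipIdx,
    PySem.Raise.InRange sheet.length (x + (ci.2 : Int)) ∧
    PySem.Raise.InRange (PySem.List.pyGetD sheet (x + (ci.2 : Int)) []).length (y + (lj.2 : Int))
instance (text : String) (x : Int) (y : Int) (sheet : List (List String)) : Decidable (Pre_write_text text x y sheet) := by unfold Pre_write_text; infer_instance

def pvWitness_write_text : String × Int × Int × List (List String) :=
  ("ab\nc", 0, 0, [[" ", " "], [" ", " "]])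

def Spec_write_text (text : String) (x : Int) (y : Int) (sheet : List (List String)) (out : List (List String)) : Prop := out = write_text_alt text x y sheet
instance (text : String) (x : Int) (y : Int) (sheet : List (List String)) (out : List (List String)) : Decidable (Spec_write_text text x y sheet out) := by unfold Spec_write_text; infer_instance

-- ===== CLAIM (what is proved, stated in full; the proofs are below) =====
def Claim_equal_write_text : Prop := ∀ (text : String) (x : Int) (y : Int) (sheet : List (List String)), Dom_write_text text x y sheet → Pre_write_text text x y sheet → Spec_write_text text x y sheet (write_text text x y sheet)

-- ===== LEMMAS AND PROOFS =====

-- B's inner loop, written as structural recursion: write line l at column start i, row j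
def pvWL (x y : Int) (j i : Nat) (s : List (List String)) : List Char → List (List String)
  | [] => s
  | c :: l => pvWL x y j (i + 1) (pvSetCell s (x + i) (y + j) (String.ofList [c])) l

-- B's outer loop: write the lines, first one starting at column i, the rest at 0
def pvG (x y : Int) (j i : Nat) (s : List (List String)) : List (List Char) → List (List String)
  | [] => s
  | l :: ls => pvG x y (j + 1) 0 (pvWL x y j i s l) ls

lemma pv_splitOn_ne_nil (l : List Char) : List.splitOn '\n' l ≠ [] := by
  simp [List.splitOn]; exact List.splitOnP_ne_nil _ l

lemma pv_split_cons_sep (l : List Char) :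
    List.splitOn '\n' ('\n' :: l) = [] :: List.splitOn '\n' l := by
  simp [List.splitOn, List.splitOnP_cons]

lemma pv_split_cons_ne {c : Char} (hc : c ≠ '\n') (l : List Char) {h : List Char}
    {t : List (List Char)} (hs : List.splitOn '\n' l = h :: t) :
    List.splitOn '\n' (c :: l) = (c :: h) :: t := by
  simp only [List.splitOn, List.splitOnP_cons, hc, beq_iff_eq] at *
  rw [hs]; rfl

-- A's scan equals B's line-by-line writing of the split text
lemma pv_scan_eq_split (x y : Int) :
    ∀ (cs : List Char) (i j : Nat) (s : List (List String)),
      (cs.foldl (pvStepA x y) ((i : Int), (j : Int), s)).2.2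
        = pvG x y j i s (List.splitOn '\n' cs) := by
  intro cs
  induction cs with
  | nil =>
      intro i j s
      simp [List.splitOn_nil, pvG, pvWL]
  | cons c cs ih =>
      intro i j s
      by_cases hc : c = '\n'
      · subst hc
        have h1 : pvStepA x y ((i : Int), (j : Int), s) '\n' = ((0 : Int), (j : Int) + 1, s) := by
          simp [pvStepA]
        rw [List.foldl_cons, h1]
        have h2 : ((j : Int) + 1) = (((j + 1 : Nat)) : Int) := by push_cast; ring
        have h0 : (0 : Int) = ((0 : Nat) : Int) := by norm_num
        rw [h2, h0, ih 0 (j + 1) s, pv_split_cons_sep]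
        rfl
      · obtain ⟨h, t, hs⟩ : ∃ h t, List.splitOn '\n' cs = h :: t := by
          rcases he : List.splitOn '\n' cs with _ | ⟨h, t⟩
          · exact absurd he (pv_splitOn_ne_nil cs)
          · exact ⟨h, t, rfl⟩
        have h1 : pvStepA x y ((i : Int), (j : Int), s) c
            = ((i : Int) + 1, (j : Int), pvSetCell s (x + i) (y + j) (String.ofList [c])) := by
          simp [pvStepA, hc]
        rw [List.foldl_cons, h1]
        have h2 : ((i : Int) + 1) = (((i + 1 : Nat)) : Int) := by push_cast; ring
        rw [h2, ih (i + 1) j _, pv_split_cons_ne hc cs hs, hs]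
        rfl

-- B's inner foldl over enumerate(line) is pvWL
lemma pv_inner_eq_wl (x y : Int) (j : Nat) :
    ∀ (l : List Char) (k : Nat) (s : List (List String)),
      (l.zipIdx k).foldl (fun s ci => pvSetCell s (x + (ci.2 : Int)) (y + (j : Int)) (String.ofList [ci.1])) s
        = pvWL x y j k s l := by
  intro l
  induction l with
  | nil => intro k s; simp [pvWL]
  | cons c l ih => intro k s; simp only [List.zipIdx, List.foldl_cons]; rw [ih]; rfl

-- B's outer foldl over enumerate(lines) is pvG with column start 0
lemma pv_outer_eq_g (x y : Int) :
    ∀ (lls : List (List Char)) (j : Nat) (s : List (List String)),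
      (lls.zipIdx j).foldl
          (fun s lj =>
            lj.1.zipIdx.foldl (fun s ci => pvSetCell s (x + (ci.2 : Int)) (y + (lj.2 : Int)) (String.ofList [ci.1])) s)
          s
        = pvG x y j 0 s lls := by
  intro lls
  induction lls with
  | nil => intro j s; simp [pvG]
  | cons l ls ih =>
      intro j s
      simp only [List.zipIdx, List.foldl_cons]
      rw [ih (j + 1)]
      show pvG x y (j + 1) 0 _ ls = _
      rw [pv_inner_eq_wl x y j l 0 s]
      rfl

-- ===== VERDICT (by name: the statement is the Claim_ definition above) =====
theorem write_text_spec : Claim_equal_write_text := by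
  intro text x y sheet _ _
  show write_text text x y sheet = write_text_alt text x y sheet
  unfold write_text write_text_alt
  have h0 : ((0 : Int), (0 : Int), sheet) = (((0 : Nat) : Int), ((0 : Nat) : Int), sheet) := by norm_num
  rw [h0, pv_scan_eq_split x y text.toList 0 0 sheet, pv_outer_eq_g x y]
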